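-- pv_equiv track=rewrite | github.com/priyanka-kumatkar/DSC_Practice | BE/Ayush.py | actualFunction
-- ===== SOURCE A (Python) =====
-- def convertToSet(st1):
--     li = {' '}
--
--     for i in range(len(st1)):
--         li.add(st1[i])
--     li.remove(' ')
--     return li
--
-- def actualFunction(str1):
--     n=1
--     cnt=0
--     while n<len(str1):
--         s1 =''
--         s2 =''
--         for i in range (len(str1)):
--             if(i<n):
--                 s1 +=str1[i]
--             else:
--                 s2 +=str1[i]
--         l1=convertToSet(s1)
--         l2=convertToSet(s2)
--         n+=1
--         if(l1==l2):
--             cnt +=1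
--     return cnt
-- ===== SOURCE B (Python) =====
-- def actualFunction(str1):
--     cs = list(str1)
--     sufs = [set()]
--     for c in reversed(cs):
--         top = sufs[-1]
--         if c != ' ':
--             top = {c} | top
--         sufs.append(top)
--     sufs.reverse()            # sufs[n] = non-space chars of cs[n:]
--     pre = set()
--     cnt = 0
--     for n in range(1, len(cs)):
--         c = cs[n - 1]
--         if c != ' ':
--             pre = pre | {c}
--         if pre == sufs[n]:
--             cnt += 1
--     return cnt
-- ===== Notes on version B (the rewrite author's own statement) =====
-- stated objective: faster
-- what changed: A rebuilds both halves character-by-character and recomputes both character sets from scratch at every split point (quadratic); B precomputes all suffix sets in one backward pass and grows the prefix set incrementally in one forward pass.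
import Mathlib
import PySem

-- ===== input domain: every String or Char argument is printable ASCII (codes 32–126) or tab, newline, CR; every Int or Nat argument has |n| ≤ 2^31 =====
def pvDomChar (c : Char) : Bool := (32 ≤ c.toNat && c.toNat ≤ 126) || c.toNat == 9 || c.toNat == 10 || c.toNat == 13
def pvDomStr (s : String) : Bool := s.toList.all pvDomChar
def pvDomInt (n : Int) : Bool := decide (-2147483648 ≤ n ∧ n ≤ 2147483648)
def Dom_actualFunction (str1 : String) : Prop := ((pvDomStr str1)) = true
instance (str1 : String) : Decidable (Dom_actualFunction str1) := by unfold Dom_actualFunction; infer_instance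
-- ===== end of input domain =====

-- B replaces A's quadratic rebuild of both halves at every split point by one backward
-- pass precomputing all suffix character sets and one forward pass growing the prefix set.

-- ===== PORT A =====
-- convertToSet: start from {' '}, add every character, remove ' '.
def convertToSetA (st1 : List Char) : List Char :=
  let li := PySem.Set.ofList [' ']
  let li := (PySem.List.pyRange 0 (st1.length : Int) 1).foldl
      (fun s i => PySem.Set.add s (PySem.List.pyGetD st1 i ' ')) li
  -- li.remove(' ') cannot raise: ' ' was inserted first
  ((PySem.Set.remove? li ' ').getD li)

-- the while-loop of A: n counts up, the inner for-loop splits the string char by char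
def loopA (cs : List Char) (n : Nat) (cnt : Int) : Int :=
  if n < cs.length then
    let pair := (PySem.List.pyRange 0 (cs.length : Int) 1).foldl
      (fun (p : List Char × List Char) i =>
        if i < (n : Int) then (p.1 ++ [PySem.List.pyGetD cs i ' '], p.2)
        else (p.1, p.2 ++ [PySem.List.pyGetD cs i ' '])) (([] : List Char), ([] : List Char))
    let l1 := convertToSetA pair.1
    let l2 := convertToSetA pair.2
    let cnt' := if PySem.Set.equal l1 l2 then cnt + 1 else cnt
    loopA cs (n + 1) cnt'
  else cnt
termination_by cs.length - n

def actualFunction (str1 : String) : Int := loopA str1.toList 1 0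

-- ===== PORT B =====
-- suffix sets built from the right (Source B: append over reversed(cs), then reverse):
-- (suffixSetsB cs)[n] is the set of non-space characters of cs[n:]
def suffixSetsB : List Char → List (List Char)
  | [] => [[]]
  | c :: rest =>
    let s := suffixSetsB rest
    let top := s.headD []
    let top := if c ≠ ' ' then PySem.Set.union (PySem.Set.ofList [c]) top else top
    top :: s

def actualFunction_alt (str1 : String) : Int :=
  let cs := str1.toList
  let sufs := suffixSetsB cs
  ((PySem.List.pyRange 1 (cs.length : Int) 1).foldl
    (fun (st : List Char × Int) n =>
      let c := PySem.List.pyGetD cs (n - 1) ' '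
      let pre := if c ≠ ' ' then PySem.Set.union st.1 (PySem.Set.ofList [c]) else st.1
      (pre, if PySem.Set.equal pre (PySem.List.pyGetD sufs n []) then st.2 + 1 else st.2))
    (([] : List Char), (0 : Int))).2

-- ===== PRECONDITION & SPEC =====
def Spec_actualFunction (str1 : String) (out : Int) : Prop := out = actualFunction_alt str1
instance (str1 : String) (out : Int) : Decidable (Spec_actualFunction str1 out) := by unfold Spec_actualFunction; infer_instance

-- ===== CLAIM (what is proved, stated in full; the proofs are below) =====
def Claim_equal_actualFunction : Prop := ∀ (str1 : String), Dom_actualFunction str1 → Spec_actualFunction str1 (actualFunction str1)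

-- ===== LEMMAS AND PROOFS =====

-- whether the non-space character sets of the two halves of the split at n agree
def eqSplit (cs : List Char) (n : Nat) : Bool :=
  PySem.Set.equal (PySem.Set.ofList ((cs.take n).filter (fun c => c != ' ')))
                  (PySem.Set.ofList ((cs.drop n).filter (fun c => c != ' ')))

theorem equal_congr {s s' t t' : List Char}
    (hs : ∀ x, x ∈ s ↔ x ∈ s') (ht : ∀ x, x ∈ t ↔ x ∈ t') :
    PySem.Set.equal s t = PySem.Set.equal s' t' := by
  rw [Bool.eq_iff_iff, PySem.Set.equal_iff, PySem.Set.equal_iff]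
  constructor
  · exact fun h x => ((hs x).symm.trans (h x)).trans (ht x)
  · exact fun h x => ((hs x).trans (h x)).trans (ht x).symm

theorem mem_convertToSetA (xs : List Char) (c : Char) :
    c ∈ convertToSetA xs ↔ c ∈ xs ∧ c ≠ ' ' := by
  unfold convertToSetA
  simp only
  rw [show (xs.length : Int) = PySem.List.len xs by simp [PySem.List.len]]
  rw [PySem.List.foldl_pyRange_zero_pyGetD xs ' ' (fun s ch => PySem.Set.add s ch)]
  rw [show xs.foldl (fun s ch => PySem.Set.add s ch) (PySem.Set.ofList [' ']) =
        PySem.Set.update (PySem.Set.ofList [' ']) xs from rfl]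
  have hmem : ' ' ∈ PySem.Set.update (PySem.Set.ofList [' ']) xs := by
    rw [PySem.Set.mem_update]; left; simp [PySem.Set.ofList]
  rw [PySem.Set.remove?_of_mem hmem]
  simp [PySem.Set.mem_discard, PySem.Set.mem_update, PySem.Set.ofList]
  tauto

theorem pairFold_aux (cs : List Char) (n : Nat) (m : Nat) (hm : m ≤ cs.length) :
    (PySem.List.pyRange 0 (m : Int) 1).foldl
      (fun (p : List Char × List Char) i =>
        if i < (n : Int) then (p.1 ++ [PySem.List.pyGetD cs i ' '], p.2)
        else (p.1, p.2 ++ [PySem.List.pyGetD cs i ' '])) (([] : List Char), ([] : List Char))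
      = ((cs.take m).take n, (cs.take m).drop n) := by
  induction m with
  | zero => simp [PySem.List.pyRange_one_eq_nil]
  | succ m ih =>
    have hm' : m ≤ cs.length := by omega
    have hmlt : m < cs.length := by omega
    rw [show ((m + 1 : Nat) : Int) = (m : Int) + 1 by push_cast; ring,
        PySem.List.pyRange_one_succ_right (by positivity), List.foldl_append, ih hm']
    simp only [List.foldl_cons, List.foldl_nil]
    have hget : PySem.List.pyGetD cs (m : Int) ' ' = cs[m] := by
      rw [PySem.List.pyGetD_natCast]; exact List.getD_eq_getElem cs ' ' hmlt
    have htake : cs.take (m + 1) = cs.take m ++ [cs[m]] := by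
      rw [List.take_add_one]; simp [List.getElem?_eq_getElem hmlt]
    have hlen : (cs.take m).length = m := List.length_take_of_le hm'
    by_cases h : m < n
    · rw [if_pos (by exact_mod_cast h)]
      rw [htake, hget, List.take_append, List.drop_append]
      simp [hlen]
      omega
    · rw [if_neg (by push_cast; omega)]
      rw [htake, hget, List.take_append, List.drop_append]
      have h2 : n - m = 0 := by omega
      simp [hlen, h2]

theorem equal_convert_eqSplit (cs : List Char) (n : Nat) :
    PySem.Set.equal (convertToSetA (cs.take n)) (convertToSetA (cs.drop n)) = eqSplit cs n := by
  unfold eqSplit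
  apply equal_congr <;> intro x <;>
    simp [mem_convertToSetA, PySem.Set.mem_ofList, List.mem_filter]

theorem loopA_eq_aux (cs : List Char) (k : Nat) :
    ∀ n cnt, cs.length - n = k →
    loopA cs n cnt = cnt + ((List.range' n (cs.length - n)).countP (eqSplit cs) : Int) := by
  induction k with
  | zero =>
    intro n cnt hk
    rw [loopA, if_neg (by omega)]
    simp [hk]
  | succ k ih =>
    intro n cnt hk
    rw [loopA, if_pos (by omega)]
    simp only
    rw [pairFold_aux cs n cs.length le_rfl, List.take_length]
    rw [equal_convert_eqSplit]
    rw [ih (n + 1) _ (by omega)]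
    rw [hk, show cs.length - (n + 1) = k by omega, List.range'_succ, List.countP_cons]
    by_cases h : eqSplit cs n = true <;> simp [h] <;> push_cast <;> ring
theorem loopA_eq (cs : List Char) (n : Nat) (cnt : Int) :
    loopA cs n cnt = cnt + ((List.range' n (cs.length - n)).countP (eqSplit cs) : Int) :=
  loopA_eq_aux cs (cs.length - n) n cnt rfl

theorem mem_headD_suffixSetsB (cs : List Char) (c : Char) :
    c ∈ (suffixSetsB cs).headD [] ↔ c ∈ cs ∧ c ≠ ' ' := by
  induction cs with
  | nil => simp [suffixSetsB]
  | cons a rest ih =>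
    simp only [suffixSetsB, List.headD_cons]
    by_cases h : a = ' '
    · subst h
      rw [if_neg (by simp), ih]
      simp only [List.mem_cons]
      constructor
      · rintro ⟨h1, h2⟩; exact ⟨Or.inr h1, h2⟩
      · rintro ⟨rfl | h1, h2⟩
        · exact absurd rfl h2
        · exact ⟨h1, h2⟩
    · rw [if_pos h]
      simp only [PySem.Set.mem_union, PySem.Set.mem_ofList, ih, List.mem_cons,
        List.mem_singleton]
      constructor
      · rintro ((rfl | h0) | ⟨h1, h2⟩)
        · exact ⟨Or.inl rfl, h⟩
        · cases h0
        · exact ⟨Or.inr h1, h2⟩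
      · rintro ⟨rfl | h1, h2⟩
        · exact Or.inl (Or.inl rfl)
        · exact Or.inr ⟨h1, h2⟩

theorem getD_zero_suffixSetsB (cs : List Char) :
    (suffixSetsB cs).getD 0 [] = (suffixSetsB cs).headD [] := by
  cases cs <;> rfl

theorem mem_getD_suffixSetsB (cs : List Char) (n : Nat) (c : Char) (hn : n ≤ cs.length) :
    c ∈ (suffixSetsB cs).getD n [] ↔ c ∈ cs.drop n ∧ c ≠ ' ' := by
  induction cs generalizing n with
  | nil =>
    have : n = 0 := by simpa using hn
    subst this
    simp [suffixSetsB]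
  | cons a rest ih =>
    cases n with
    | zero =>
      rw [getD_zero_suffixSetsB, mem_headD_suffixSetsB]
      simp
    | succ n =>
      have h : (suffixSetsB (a :: rest)).getD (n + 1) [] = (suffixSetsB rest).getD n [] := by
        simp [suffixSetsB]
      rw [h, ih n (by simpa using hn)]
      simp

theorem foldB_eq_aux (cs : List Char) (k : Nat) :
    ∀ (a : Nat) (st : List Char × Int), cs.length - a = k → 1 ≤ a →
    (∀ x, x ∈ st.1 ↔ x ∈ (cs.take (a - 1)).filter (fun c => c != ' ')) →
    ((PySem.List.pyRange (a : Int) (cs.length : Int) 1).foldl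
      (fun (st : List Char × Int) n =>
        let c := PySem.List.pyGetD cs (n - 1) ' '
        let pre := if c ≠ ' ' then PySem.Set.union st.1 (PySem.Set.ofList [c]) else st.1
        (pre, if PySem.Set.equal pre (PySem.List.pyGetD (suffixSetsB cs) n []) then st.2 + 1 else st.2))
      st).2
      = st.2 + ((List.range' a (cs.length - a)).countP (eqSplit cs) : Int) := by
  induction k with
  | zero =>
    intro a st hk ha hpre
    rw [PySem.List.pyRange_one_eq_nil (by exact_mod_cast Nat.le_of_sub_eq_zero hk)]
    simp [hk]
  | succ k ih =>
    intro a st hk ha hpre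
    have halt : a < cs.length := by omega
    rw [PySem.List.pyRange_one_cons (by exact_mod_cast halt), List.foldl_cons]
    have hstep : (let c := PySem.List.pyGetD cs ((a : Int) - 1) ' '
        let pre := if c ≠ ' ' then PySem.Set.union st.1 (PySem.Set.ofList [c]) else st.1
        (pre, if PySem.Set.equal pre (PySem.List.pyGetD (suffixSetsB cs) (a : Int) []) then st.2 + 1 else st.2))
      = ((if PySem.List.pyGetD cs ((a : Int) - 1) ' ' ≠ ' '
            then PySem.Set.union st.1 (PySem.Set.ofList [PySem.List.pyGetD cs ((a : Int) - 1) ' '])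
            else st.1),
         (if PySem.Set.equal
              (if PySem.List.pyGetD cs ((a : Int) - 1) ' ' ≠ ' '
                then PySem.Set.union st.1 (PySem.Set.ofList [PySem.List.pyGetD cs ((a : Int) - 1) ' '])
                else st.1)
              (PySem.List.pyGetD (suffixSetsB cs) (a : Int) []) then st.2 + 1 else st.2)) := rfl
    rw [hstep]
    have hlt : a - 1 < cs.length := by omega
    have hc1 : (a : Int) - 1 = ((a - 1 : Nat) : Int) := by push_cast; omega
    have hgetc : PySem.List.pyGetD cs ((a : Int) - 1) ' ' = cs[a - 1]'hlt := by
      rw [hc1, PySem.List.pyGetD_natCast]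
      exact List.getD_eq_getElem cs ' ' hlt
    have htake : cs.take a = cs.take (a - 1) ++ [cs[a - 1]'hlt] := by
      have h2 : a - 1 + 1 = a := by omega
      have h3 := List.take_add_one (l := cs) (i := a - 1)
      rw [h2] at h3
      rw [h3]
      simp [List.getElem?_eq_getElem hlt]
    have hpre' : ∀ x, x ∈ (if PySem.List.pyGetD cs ((a : Int) - 1) ' ' ≠ ' '
            then PySem.Set.union st.1 (PySem.Set.ofList [PySem.List.pyGetD cs ((a : Int) - 1) ' '])
            else st.1) ↔
        x ∈ (cs.take a).filter (fun c => c != ' ') := by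
      intro x
      rw [hgetc, htake, List.filter_append]
      by_cases hsp : cs[a - 1]'hlt = ' '
      · rw [if_neg (by simp [hsp]), hpre x]
        simp [hsp]
      · rw [if_pos hsp]
        simp only [PySem.Set.mem_union, PySem.Set.mem_ofList, hpre x, List.mem_append,
          List.mem_filter, List.filter_cons, List.filter_nil]
        by_cases hx : x = cs[a - 1]'hlt
        · subst hx
          simp [hsp]
        · simp [hx]
    have hequal : PySem.Set.equal
          (if PySem.List.pyGetD cs ((a : Int) - 1) ' ' ≠ ' '
            then PySem.Set.union st.1 (PySem.Set.ofList [PySem.List.pyGetD cs ((a : Int) - 1) ' '])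
            else st.1)
          (PySem.List.pyGetD (suffixSetsB cs) (a : Int) []) = eqSplit cs a := by
      unfold eqSplit
      apply equal_congr
      · intro x
        rw [hpre' x, PySem.Set.mem_ofList]
      · intro x
        rw [PySem.List.pyGetD_natCast, mem_getD_suffixSetsB cs a x (le_of_lt halt),
          PySem.Set.mem_ofList, List.mem_filter]
        simp
    rw [show (a : Int) + 1 = ((a + 1 : Nat) : Int) by push_cast; ring]
    rw [ih (a + 1) _ (by omega) (by omega) (by intro x; simpa using hpre' x)]
    rw [hequal, hk, show cs.length - (a + 1) = k by omega, List.range'_succ, List.countP_cons]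
    by_cases h : eqSplit cs a = true <;> simp [h] <;> push_cast <;> ring

theorem alt_eq (str1 : String) :
    actualFunction_alt str1
      = 0 + ((List.range' 1 (str1.toList.length - 1)).countP (eqSplit str1.toList) : Int) := by
  have h := foldB_eq_aux str1.toList (str1.toList.length - 1) 1 (([] : List Char), (0 : Int))
    rfl le_rfl (by simp)
  unfold actualFunction_alt
  simpa using h

-- ===== VERDICT (by name: the statement is the Claim_ definition above) =====
theorem actualFunction_spec : Claim_equal_actualFunction := by
  intro str1 _
  unfold Spec_actualFunction actualFunction
  rw [alt_eq, loopA_eq]
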